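-- pv_equiv track=rewrite | github.com/6loss0m/MHC_study | Hyewon711/프로그래머스/2018 KAKAO BLIND RECRUITMENT/17679-freind 4block.py | delete_block
-- ===== SOURCE A (Python) =====
-- def delete_block(m, n, board): # 블록 삭제
--     delete = []
--
--     for x in range(m - 1): # 문자열 개수만큼
--         for y in range(n - 1): # 문자열 길이만큼
--             if board[x][y] == '': # 만약 지워졌다면 넘어가기
--                 continue
--
--             if board[x][y] == board[x][y + 1] and board[x][y] == board[x + 1][y] and board[x][y] == board[x + 1][y + 1]: # 만약 2*2가 같은 블록이라면?
--                 delete.append((x, y))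
--                 delete.append((x + 1, y))
--                 delete.append((x, y + 1))
--                 delete.append((x + 1, y + 1)) # 삭제할 블록의 좌표 모두 추가
--
--     delete = set(delete) # 집합 set 으로 저장
--
--     for x, y in delete: # 만약 x, y가 delete에 저장된 집합에 있다면?
--         board[x][y] = '' # 블록 지우기
--
--     return board, len(delete) # 보드 정보와 지워진 집합 개수 리턴
-- ===== SOURCE B (Python) =====
-- def _match(board, m, n, a, b):
--     # True iff the 2x2 block with top-left corner (a, b) exists and matches
--     if a < 0 or a > m - 2 or b < 0 or b > n - 2:
--         return False
--     v = board[a][b]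
--     return v != '' and v == board[a][b + 1] and v == board[a + 1][b] and v == board[a + 1][b + 1]
--
-- def _hit(board, m, n, x, y):
--     # cell (x, y) belongs to at least one matched 2x2 block
--     return (_match(board, m, n, x, y) or _match(board, m, n, x - 1, y)
--             or _match(board, m, n, x, y - 1) or _match(board, m, n, x - 1, y - 1))
--
-- def delete_block(m, n, board):
--     # per-cell pull: mark each cell by checking its four candidate blocks, then sweep
--     marked = [[_hit(board, m, n, x, y) for y in range(len(board[x]))]
--               for x in range(len(board))]
--     count = 0
--     for x, row in enumerate(board):
--         hits = marked[x]
--         for y in range(len(row)):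
--             if hits[y]:
--                 row[y] = ''
--                 count += 1
--     return board, count
-- ===== Notes on version B (the rewrite author's own statement) =====
-- stated objective: alternative
-- what changed: A pushes the four corner coordinates of every matched 2x2 block into a list and deduplicates with a set before erasing; B instead pulls per cell: it builds a boolean mark grid by testing, for each cell, the four candidate blocks that could cover it, then sweeps the board once, erasing marked cells in place and counting them.
-- outside the precondition, e.g. on delete_block(2, 2, [[''], ['']]): A returns ([[''], ['']], 0), B returns ([[''], ['']], 0)
import Mathlib
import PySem

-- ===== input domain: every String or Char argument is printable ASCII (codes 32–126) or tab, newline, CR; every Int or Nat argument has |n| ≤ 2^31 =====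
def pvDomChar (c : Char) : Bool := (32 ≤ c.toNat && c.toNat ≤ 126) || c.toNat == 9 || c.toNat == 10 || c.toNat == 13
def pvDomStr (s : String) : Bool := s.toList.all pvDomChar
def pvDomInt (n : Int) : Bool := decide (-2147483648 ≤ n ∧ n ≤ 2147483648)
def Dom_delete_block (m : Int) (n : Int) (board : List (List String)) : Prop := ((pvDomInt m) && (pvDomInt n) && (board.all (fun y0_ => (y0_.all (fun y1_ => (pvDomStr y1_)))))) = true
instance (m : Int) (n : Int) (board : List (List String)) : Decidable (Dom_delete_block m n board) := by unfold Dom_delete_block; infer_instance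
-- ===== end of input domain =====

-- B changes the algorithm (per-cell pull with a boolean mark grid instead of per-block push into a set);
-- both Pythons mutate `board` in place, and the equivalence proved here is about the returned value.

-- ===== PORT A =====
-- board[x][y]; Pre_ guarantees every access is in range, so the total pyGetD form is exact there
def aGet (board : List (List String)) (x y : Int) : String :=
  PySem.List.pyGetD (PySem.List.pyGetD board x []) y ""

def delete_block (m : Int) (n : Int) (board : List (List String)) : List (List String) × Int :=
  let del := (PySem.List.pyRange 0 (m - 1) 1).foldl (fun acc x =>
    (PySem.List.pyRange 0 (n - 1) 1).foldl (fun acc2 y =>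
      if aGet board x y = "" then acc2
      else if aGet board x y = aGet board x (y + 1) ∧ aGet board x y = aGet board (x + 1) y ∧
              aGet board x y = aGet board (x + 1) (y + 1) then
        acc2 ++ [(x, y), (x + 1, y), (x, y + 1), (x + 1, y + 1)]
      else acc2) acc) ([] : List (Int × Int))
  let s : PySem.Set (Int × Int) := PySem.Set.ofList del
  -- board[x][y] = '' for each (x, y) in the set (order-independent: every update writes '')
  let bd := s.foldl (fun b p =>
    PySem.List.pySetD b p.1 (PySem.List.pySetD (PySem.List.pyGetD b p.1 []) p.2 "")) board
  (bd, (s.length : Int))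

-- ===== PORT B =====
-- board[a][b]; guarded by B's bound checks (exact under Pre_)
def bGet (board : List (List String)) (a b : Int) : String :=
  PySem.List.pyGetD (PySem.List.pyGetD board a []) b ""

def bMatch (board : List (List String)) (m n a b : Int) : Bool :=
  if a < 0 ∨ m - 2 < a ∨ b < 0 ∨ n - 2 < b then false
  else
    let v := bGet board a b
    decide (v ≠ "" ∧ v = bGet board a (b + 1) ∧ v = bGet board (a + 1) b ∧ v = bGet board (a + 1) (b + 1))

def bHit (board : List (List String)) (m n x y : Int) : Bool :=
  bMatch board m n x y || bMatch board m n (x - 1) y ||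
  bMatch board m n x (y - 1) || bMatch board m n (x - 1) (y - 1)

-- 'for y in range(len(row)): if hits[y]: row[y] = ''; count += 1'
def bSweepRow (hits : List Bool) (row : List String) : List String × Int :=
  (PySem.List.pyRange 0 (row.length : Int) 1).foldl
    (fun st y => if PySem.List.pyGetD hits y false then (PySem.List.pySetD st.1 y "", st.2 + 1) else st)
    (row, (0 : Int))

def delete_block_alt (m : Int) (n : Int) (board : List (List String)) : List (List String) × Int :=
  let marked := (PySem.List.pyRange 0 (board.length : Int) 1).map (fun x =>
    (PySem.List.pyRange 0 ((PySem.List.pyGetD board x []).length : Int) 1).map (fun y =>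
      bHit board m n x y))
  (PySem.List.enumerate board 0).foldl
    (fun (st : List (List String) × Int) p =>
      let r := bSweepRow (PySem.List.pyGetD marked p.1 []) p.2
      (st.1 ++ [r.1], st.2 + r.2))
    ([], (0 : Int))

-- ===== PRECONDITION & SPEC =====
-- Pre_ excludes exactly the inputs on which the nested indexing raises IndexError; it is slightly
-- stronger than A's data-dependent access pattern (it asks every scanned row for length ≥ n, so e.g. a
-- board whose rows have length n-1 and whose scanned cells are all '' — on which A happens to return — is excluded).
def Pre_delete_block (m : Int) (n : Int) (board : List (List String)) : Prop :=
  m ≤ 1 ∨ n ≤ 1 ∨ (m ≤ (board.length : Int) ∧ ∀ row ∈ board.take m.toNat, n ≤ (row.length : Int))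
instance (m : Int) (n : Int) (board : List (List String)) : Decidable (Pre_delete_block m n board) := by
  unfold Pre_delete_block; infer_instance

def pvWitness_delete_block : Int × Int × List (List String) :=
  (2, 2, [["a", "a"], ["a", "a"]])

def Spec_delete_block (m : Int) (n : Int) (board : List (List String)) (out : List (List String) × Int) : Prop := out = delete_block_alt m n board
instance (m : Int) (n : Int) (board : List (List String)) (out : List (List String) × Int) : Decidable (Spec_delete_block m n board out) := by unfold Spec_delete_block; infer_instance

-- ===== CLAIM (what is proved, stated in full; the proofs are below) =====
def Claim_equal_delete_block : Prop := ∀ (m : Int) (n : Int) (board : List (List String)), Dom_delete_block m n board → Pre_delete_block m n board → Spec_delete_block m n board (delete_block m n board)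

-- ===== LEMMAS AND PROOFS =====

-- the list A pushes block corners into, written as a flatMap
def delList (m n : Int) (board : List (List String)) : List (Int × Int) :=
  (PySem.List.pyRange 0 (m - 1) 1).flatMap (fun x =>
    (PySem.List.pyRange 0 (n - 1) 1).flatMap (fun y =>
      if bMatch board m n x y then [(x, y), (x + 1, y), (x, y + 1), (x + 1, y + 1)] else []))

theorem bMatch_bounds {board : List (List String)} {m n a b : Int}
    (h : bMatch board m n a b = true) : 0 ≤ a ∧ a ≤ m - 2 ∧ 0 ≤ b ∧ b ≤ n - 2 := by
  unfold bMatch at h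
  by_cases hc : a < 0 ∨ m - 2 < a ∨ b < 0 ∨ n - 2 < b
  · rw [if_pos hc] at h; cases h
  · omega

theorem bMatch_eq_of_range {board : List (List String)} {m n x y : Int}
    (hx0 : 0 ≤ x) (hx : x < m - 1) (hy0 : 0 ≤ y) (hy : y < n - 1) :
    bMatch board m n x y =
      decide (¬ aGet board x y = "" ∧ aGet board x y = aGet board x (y + 1) ∧
        aGet board x y = aGet board (x + 1) y ∧ aGet board x y = aGet board (x + 1) (y + 1)) := by
  unfold bMatch
  rw [if_neg (by omega)]
  rfl

theorem del_eq (m n : Int) (board : List (List String)) :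
    ((PySem.List.pyRange 0 (m - 1) 1).foldl (fun acc x =>
      (PySem.List.pyRange 0 (n - 1) 1).foldl (fun acc2 y =>
        if aGet board x y = "" then acc2
        else if aGet board x y = aGet board x (y + 1) ∧ aGet board x y = aGet board (x + 1) y ∧
                aGet board x y = aGet board (x + 1) (y + 1) then
          acc2 ++ [(x, y), (x + 1, y), (x, y + 1), (x + 1, y + 1)]
        else acc2) acc) ([] : List (Int × Int)))
    = delList m n board := by
  unfold delList
  rw [PySem.List.foldl_congr_mem (g := fun acc x => acc ++
      (PySem.List.pyRange 0 (n - 1) 1).flatMap (fun y =>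
        if bMatch board m n x y then [(x, y), (x + 1, y), (x, y + 1), (x + 1, y + 1)] else []))]
  · rw [PySem.List.foldl_append_eq_flatMap, List.nil_append]
  · intro acc x hx
    rw [PySem.List.foldl_congr_mem (g := fun acc2 y => acc2 ++
        (if bMatch board m n x y then [(x, y), (x + 1, y), (x, y + 1), (x + 1, y + 1)] else []))]
    · rw [PySem.List.foldl_append_eq_flatMap]
    · intro acc2 y hy
      rw [PySem.List.mem_pyRange_one] at hx hy
      rw [bMatch_eq_of_range hx.1 hx.2 hy.1 hy.2]
      by_cases h1 : aGet board x y = ""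
      · rw [if_pos h1, decide_eq_false (fun hc => hc.1 h1)]
        simp
      · rw [if_neg h1]
        by_cases h2 : aGet board x y = aGet board x (y + 1) ∧ aGet board x y = aGet board (x + 1) y ∧
            aGet board x y = aGet board (x + 1) (y + 1)
        · rw [if_pos h2, decide_eq_true (show _ ∧ _ from ⟨h1, h2⟩)]
          simp
        · rw [if_neg h2, decide_eq_false (fun hc => h2 hc.2)]
          simp

theorem mem_delList {m n : Int} {board : List (List String)} {p : Int × Int} :
    p ∈ delList m n board ↔ bHit board m n p.1 p.2 = true := by
  obtain ⟨u, v⟩ := p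
  simp only [delList, List.mem_flatMap, PySem.List.mem_pyRange_one]
  constructor
  · rintro ⟨x, hx, y, hy, hp⟩
    by_cases hb : bMatch board m n x y = true
    · rw [if_pos hb] at hp
      simp only [List.mem_cons, List.not_mem_nil, or_false, Prod.mk.injEq] at hp
      unfold bHit
      simp only [Bool.or_eq_true]
      rcases hp with ⟨h1, h2⟩ | ⟨h1, h2⟩ | ⟨h1, h2⟩ | ⟨h1, h2⟩
      · exact Or.inl (Or.inl (Or.inl (by rw [h1, h2]; exact hb)))
      · refine Or.inl (Or.inl (Or.inr ?_))
        have hux : u - 1 = x := by omega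
        rw [h2, hux]; exact hb
      · refine Or.inl (Or.inr ?_)
        have hvy : v - 1 = y := by omega
        rw [h1, hvy]; exact hb
      · refine Or.inr ?_
        have hux : u - 1 = x := by omega
        have hvy : v - 1 = y := by omega
        rw [hux, hvy]; exact hb
    · rw [if_neg hb] at hp; cases hp
  · intro h
    unfold bHit at h
    simp only [Bool.or_eq_true] at h
    rcases h with ((h | h) | h) | h
    · obtain ⟨h1, h2, h3, h4⟩ := bMatch_bounds h
      exact ⟨u, ⟨h1, by omega⟩, v, ⟨h3, by omega⟩, by rw [if_pos h]; simp⟩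
    · obtain ⟨h1, h2, h3, h4⟩ := bMatch_bounds h
      refine ⟨u - 1, ⟨h1, by omega⟩, v, ⟨h3, by omega⟩, ?_⟩
      rw [if_pos h]
      have he : u - 1 + 1 = u := by omega
      rw [he]; simp
    · obtain ⟨h1, h2, h3, h4⟩ := bMatch_bounds h
      refine ⟨u, ⟨h1, by omega⟩, v - 1, ⟨h3, by omega⟩, ?_⟩
      rw [if_pos h]
      have he : v - 1 + 1 = v := by omega
      rw [he]; simp
    · obtain ⟨h1, h2, h3, h4⟩ := bMatch_bounds h
      refine ⟨u - 1, ⟨h1, by omega⟩, v - 1, ⟨h3, by omega⟩, ?_⟩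
      rw [if_pos h]
      have he1 : u - 1 + 1 = u := by omega
      have he2 : v - 1 + 1 = v := by omega
      rw [he1, he2]; simp

theorem match_inbounds {board : List (List String)} {m n a b : Int}
    (hPre : Pre_delete_block m n board) (h : bMatch board m n a b = true) :
    0 ≤ a ∧ a.toNat + 1 < board.length ∧ 0 ≤ b ∧
      b.toNat + 1 < (board.getD a.toNat []).length ∧
      b.toNat + 1 < (board.getD (a.toNat + 1) []).length := by
  obtain ⟨h1, h2, h3, h4⟩ := bMatch_bounds h
  rcases hPre with hm | hn | ⟨hm, hrows⟩
  · omega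
  · omega
  · have hmlen : m.toNat ≤ board.length := by omega
    have hrow : ∀ i : Nat, i < m.toNat → n ≤ ((board.getD i []).length : Int) := by
      intro i hi
      have hilen : i < board.length := by omega
      have hmem : board.getD i [] ∈ board.take m.toNat := by
        rw [List.getD_eq_getElem board [] hilen]
        have hlt : i < (board.take m.toNat).length := by
          rw [List.length_take]; omega
        have := List.getElem_take (xs := board) (i := i) (j := m.toNat) (h := hlt)
        rw [← this]
        exact List.getElem_mem hlt
      exact hrows _ hmem
    have ha1 : a.toNat < m.toNat := by omega
    have ha2 : a.toNat + 1 < m.toNat ∨ a.toNat + 1 = m.toNat := by omega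
    have hr1 := hrow a.toNat ha1
    have hr2 : n ≤ ((board.getD (a.toNat + 1) []).length : Int) := by
      have : a.toNat + 1 < m.toNat := by omega
      exact hrow _ this
    refine ⟨h1, by omega, h3, by omega, by omega⟩

theorem hit_inbounds {board : List (List String)} {m n u v : Int}
    (hPre : Pre_delete_block m n board) (h : bHit board m n u v = true) :
    0 ≤ u ∧ u.toNat < board.length ∧ 0 ≤ v ∧ v.toNat < (board.getD u.toNat []).length := by
  unfold bHit at h
  simp only [Bool.or_eq_true] at h
  rcases h with ((h | h) | h) | h
  · obtain ⟨h1, h2, h3, h4, h5⟩ := match_inbounds hPre h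
    exact ⟨h1, by omega, h3, by omega⟩
  · obtain ⟨h1, h2, h3, h4, h5⟩ := match_inbounds hPre h
    have hu : u.toNat = (u - 1).toNat + 1 := by omega
    exact ⟨by omega, by omega, h3, by rw [hu]; omega⟩
  · obtain ⟨h1, h2, h3, h4, h5⟩ := match_inbounds hPre h
    exact ⟨h1, by omega, by omega, by omega⟩
  · obtain ⟨h1, h2, h3, h4, h5⟩ := match_inbounds hPre h
    have hu : u.toNat = (u - 1).toNat + 1 := by omega
    exact ⟨by omega, by omega, by omega, by rw [hu]; omega⟩

-- getD through List.set
theorem getD_set_self {α : Type} (l : List α) (k : Nat) (v d : α) (hk : k < l.length) :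
    (l.set k v).getD k d = v := by
  rw [List.getD_eq_getElem _ _ (by simpa using hk)]
  simp

theorem getD_set_ne {α : Type} (l : List α) (k j : Nat) (v d : α) (hj : j ≠ k) :
    (l.set k v).getD j d = l.getD j d := by
  by_cases h : j < l.length
  · rw [List.getD_eq_getElem _ _ (by simpa using h), List.getD_eq_getElem _ _ h]
    simp [hj.symm]
  · rw [List.getD_eq_default _ _ (by simpa using h), List.getD_eq_default _ _ (by omega)]

-- A's deletion loop over any list of in-bounds coordinates
theorem foldA : ∀ (L : List (Int × Int)) (b : List (List String)),
    (∀ p ∈ L, 0 ≤ p.1 ∧ p.1.toNat < b.length ∧ 0 ≤ p.2 ∧ p.2.toNat < (b.getD p.1.toNat []).length) →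
    (L.foldl (fun bb p =>
        PySem.List.pySetD bb p.1 (PySem.List.pySetD (PySem.List.pyGetD bb p.1 []) p.2 "")) b).length = b.length
    ∧ (∀ i : Nat, ((L.foldl (fun bb p =>
        PySem.List.pySetD bb p.1 (PySem.List.pySetD (PySem.List.pyGetD bb p.1 []) p.2 "")) b).getD i []).length = (b.getD i []).length)
    ∧ (∀ i j : Nat, ((L.foldl (fun bb p =>
        PySem.List.pySetD bb p.1 (PySem.List.pySetD (PySem.List.pyGetD bb p.1 []) p.2 "")) b).getD i []).getD j ""
        = if ((i : Int), (j : Int)) ∈ L then "" else (b.getD i []).getD j "") := by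
  intro L
  induction L with
  | nil => intro b _; refine ⟨rfl, fun i => rfl, fun i j => by simp⟩
  | cons p L ih =>
    intro b hL
    obtain ⟨hp1, hp2, hp3, hp4⟩ := hL p (by simp)
    have hlt : p.1 < (b.length : Int) := by omega
    have hrow : PySem.List.pyGetD b p.1 [] = b.getD p.1.toNat [] := by
      rw [List.getD_eq_getElem _ _ hp2]
      exact PySem.List.pyGetD_eq_getElem b [] hp1 hlt
    have hb' : PySem.List.pySetD b p.1 (PySem.List.pySetD (PySem.List.pyGetD b p.1 []) p.2 "")
        = b.set p.1.toNat ((b.getD p.1.toNat []).set p.2.toNat "") := by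
      rw [hrow, PySem.List.pySetD_of_nonneg _ _ hp3, PySem.List.pySetD_of_nonneg _ _ hp1]
    set b' := b.set p.1.toNat ((b.getD p.1.toNat []).set p.2.toNat "") with hb'def
    have hlen : b'.length = b.length := by simp [hb'def]
    have hrowD : ∀ i : Nat, b'.getD i [] =
        if i = p.1.toNat then (b.getD p.1.toNat []).set p.2.toNat "" else b.getD i [] := by
      intro i
      by_cases hi : i = p.1.toNat
      · rw [hi, if_pos rfl, hb'def, getD_set_self _ _ _ _ hp2]
      · rw [if_neg hi, hb'def, getD_set_ne _ _ _ _ _ hi]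
    have hrlen : ∀ i : Nat, (b'.getD i []).length = (b.getD i []).length := by
      intro i; rw [hrowD i]; by_cases hi : i = p.1.toNat <;> simp [hi]
    have hL' : ∀ q ∈ L, 0 ≤ q.1 ∧ q.1.toNat < b'.length ∧ 0 ≤ q.2 ∧
        q.2.toNat < (b'.getD q.1.toNat []).length := by
      intro q hq
      obtain ⟨g1, g2, g3, g4⟩ := hL q (by simp [hq])
      exact ⟨g1, by rw [hlen]; exact g2, g3, by rw [hrlen]; exact g4⟩
    obtain ⟨ih1, ih2, ih3⟩ := ih b' hL'
    rw [List.foldl_cons, hb']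
    refine ⟨by rw [ih1, hlen], fun i => by rw [ih2 i, hrlen i], ?_⟩
    intro i j
    rw [ih3 i j]
    by_cases hmem : ((i : Int), (j : Int)) ∈ L
    · simp [hmem]
    · rw [if_neg hmem]
      by_cases hpe : ((i : Int), (j : Int)) = p
      · have hi : i = p.1.toNat := by
          have := congrArg Prod.fst hpe; simp at this; omega
        have hj : j = p.2.toNat := by
          have := congrArg Prod.snd hpe; simp at this; omega
        rw [if_pos (by simp [hpe]), hrowD i, if_pos hi, hj,
          getD_set_self _ _ _ _ hp4]
      · rw [if_neg (by simp [hpe, hmem]), hrowD i]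
        by_cases hi : i = p.1.toNat
        · have hj : j ≠ p.2.toNat := by
            intro hj
            exact hpe (by rw [hi, hj]; simp [Prod.ext_iff]; omega)
          rw [if_pos hi, hi, getD_set_ne _ _ _ _ _ hj]
        · rw [if_neg hi]

-- B's row sweep
theorem sweepAux (hits : List Bool) (row : List String) :
    ∀ K : Nat, K ≤ row.length →
    ((PySem.List.pyRange 0 (K : Int) 1).foldl
      (fun st y => if PySem.List.pyGetD hits y false then (PySem.List.pySetD st.1 y "", st.2 + 1) else st)
      (row, (0 : Int))).1.length = row.length
    ∧ (∀ j : Nat, ((PySem.List.pyRange 0 (K : Int) 1).foldl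
      (fun st y => if PySem.List.pyGetD hits y false then (PySem.List.pySetD st.1 y "", st.2 + 1) else st)
      (row, (0 : Int))).1.getD j "" = if j < K ∧ hits.getD j false = true then "" else row.getD j "")
    ∧ ((PySem.List.pyRange 0 (K : Int) 1).foldl
      (fun st y => if PySem.List.pyGetD hits y false then (PySem.List.pySetD st.1 y "", st.2 + 1) else st)
      (row, (0 : Int))).2 = (((List.range K).countP (fun j => hits.getD j false)) : Int) := by
  intro K
  induction K with
  | zero =>
    intro _
    rw [show ((0 : Nat) : Int) = 0 from rfl, PySem.List.pyRange_one_eq_nil (by omega)]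
    refine ⟨rfl, fun j => by simp, by simp⟩
  | succ K ih =>
    intro hK
    obtain ⟨ih1, ih2, ih3⟩ := ih (by omega)
    have hcast : ((K + 1 : Nat) : Int) = (K : Int) + 1 := by omega
    rw [hcast, PySem.List.pyRange_one_succ_right (by omega), List.foldl_append]
    simp only [List.foldl_cons, List.foldl_nil]
    have hget : PySem.List.pyGetD hits ((K : Nat) : Int) false = hits.getD K false :=
      PySem.List.pyGetD_natCast hits K false
    rw [hget]
    by_cases hk : hits.getD K false = true
    · rw [if_pos hk]
      simp only [PySem.List.pySetD_natCast]
      refine ⟨?_, ?_, ?_⟩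
      · rw [List.length_set, ih1]
      · intro j
        by_cases hj : j = K
        · rw [hj, getD_set_self _ _ _ _ (by rw [ih1]; omega), if_pos ⟨by omega, hk⟩]
        · rw [getD_set_ne _ _ _ _ _ hj, ih2 j]
          by_cases hc : j < K ∧ hits.getD j false = true
          · rw [if_pos hc, if_pos ⟨by omega, hc.2⟩]
          · rw [if_neg hc, if_neg (fun hc2 => hc ⟨by omega, hc2.2⟩)]
      · have h1 : List.countP (fun j => hits.getD j false) [K] = 1 := by
          rw [List.countP_cons, List.countP_nil, hk]
          simp
        rw [ih3, List.range_succ, List.countP_append, h1]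
        push_cast
        ring
    · rw [if_neg hk]
      rw [Bool.not_eq_true] at hk
      refine ⟨ih1, ?_, ?_⟩
      · intro j
        rw [ih2 j]
        by_cases hj : j = K
        · rw [if_neg (by rintro ⟨a, _⟩; omega), if_neg (by rintro ⟨_, c⟩; rw [hj, hk] at c; cases c)]
        · by_cases hc : j < K ∧ hits.getD j false = true
          · rw [if_pos hc, if_pos ⟨by omega, hc.2⟩]
          · rw [if_neg hc, if_neg (fun hc2 => hc ⟨by omega, hc2.2⟩)]
      · have h0 : List.countP (fun j => hits.getD j false) [K] = 0 := by
          rw [List.countP_cons, List.countP_nil, hk]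
          simp
        rw [ih3, List.range_succ, List.countP_append, h0]
        simp

theorem bSweepRow_len (hits : List Bool) (row : List String) :
    (bSweepRow hits row).1.length = row.length :=
  (sweepAux hits row row.length (le_refl _)).1

theorem bSweepRow_getD (hits : List Bool) (row : List String) (j : Nat) (hj : j < row.length) :
    (bSweepRow hits row).1.getD j "" = if hits.getD j false = true then "" else row.getD j "" := by
  have := (sweepAux hits row row.length (le_refl _)).2.1 j
  unfold bSweepRow
  rw [this]
  simp [hj]

theorem bSweepRow_cnt (hits : List Bool) (row : List String) :
    (bSweepRow hits row).2 = (((List.range row.length).countP (fun j => hits.getD j false)) : Int) :=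
  (sweepAux hits row row.length (le_refl _)).2.2

-- B's outer sweep loop
theorem outerB (marked : List (List Bool)) : ∀ (bd : List (List String)) (s : Int)
    (acc : List (List String) × Int),
    ((PySem.List.enumerate bd s).foldl (fun (st : List (List String) × Int) p =>
      (st.1 ++ [(bSweepRow (PySem.List.pyGetD marked p.1 []) p.2).1],
       st.2 + (bSweepRow (PySem.List.pyGetD marked p.1 []) p.2).2)) acc)
    = (acc.1 ++ (PySem.List.enumerate bd s).map (fun p => (bSweepRow (PySem.List.pyGetD marked p.1 []) p.2).1),
       acc.2 + ((PySem.List.enumerate bd s).map (fun p => (bSweepRow (PySem.List.pyGetD marked p.1 []) p.2).2)).sum) := by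
  intro bd
  induction bd with
  | nil => intro s acc; simp [PySem.List.enumerate_nil]
  | cons r bd ih =>
    intro s acc
    rw [PySem.List.enumerate_cons, List.foldl_cons, ih]
    simp [List.append_assoc, add_assoc]

-- countP over a flatMap
theorem countP_flatMap {α β : Type} (l : List α) (f : α → List β) (q : β → Bool) :
    ((l.flatMap f).countP q) = (l.map (fun a => (f a).countP q)).sum := by
  induction l with
  | nil => simp
  | cons a l ih => simp [List.flatMap_cons, List.countP_append, ih]

-- all (row, column) positions of the board, as Int pairs
def positions (bd : List (List String)) : List (Int × Int) :=
  (List.range bd.length).flatMap (fun i =>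
    (List.range ((bd.getD i []).length)).map (fun (j : Nat) => ((i : Int), (j : Int))))

theorem nodup_positions (bd : List (List String)) : (positions bd).Nodup := by
  unfold positions
  rw [List.nodup_flatMap]
  constructor
  · intro i _
    refine (List.nodup_range).map ?_
    intro j1 j2 h
    have := congrArg Prod.snd h
    simp at this
    exact this
  · have hnd := List.nodup_range (n := bd.length)
    refine hnd.imp ?_
    intro i1 i2 hne
    simp only [Function.onFun, List.disjoint_left]
    rintro p hp1 hp2
    simp only [List.mem_map, List.mem_range] at hp1 hp2
    obtain ⟨j1, _, rfl⟩ := hp1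
    obtain ⟨j2, _, he⟩ := hp2
    have := congrArg Prod.fst he
    simp at this
    omega

theorem mem_positions {bd : List (List String)} {p : Int × Int} :
    p ∈ positions bd ↔ 0 ≤ p.1 ∧ p.1.toNat < bd.length ∧ 0 ≤ p.2 ∧
      p.2.toNat < (bd.getD p.1.toNat []).length := by
  obtain ⟨u, v⟩ := p
  unfold positions
  simp only [List.mem_flatMap, List.mem_range, List.mem_map, Prod.mk.injEq]
  constructor
  · rintro ⟨i, hi, j, hj, h1, h2⟩
    refine ⟨by omega, by omega, by omega, ?_⟩
    have hu : u.toNat = i := by omega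
    have hv : v.toNat = j := by omega
    rw [hu, hv]; exact hj
  · rintro ⟨h1, h2, h3, h4⟩
    exact ⟨u.toNat, h2, v.toNat, h4, by omega, by omega⟩

-- reading the k-th entry of a list built as '[f(x) for x in range(R)]'
theorem getD_map_pyRange_nat {beta : Type} (f : Int → beta) (d : beta) (R k : Nat) (hk : k < R) :
    (((PySem.List.pyRange 0 (R : Int) 1).map f).getD k d) = f ((k : Nat) : Int) := by
  rw [List.getD_eq_getElem _ _ (by rw [List.length_map, PySem.List.length_pyRange_one]; omega)]
  rw [List.getElem_map, PySem.List.getElem_pyRange_one]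
  rw [zero_add]

-- ===== VERDICT (by name: the statement is the Claim_ definition above) =====
theorem delete_block_spec : Claim_equal_delete_block := by
  intro m n bd hDom hPre
  unfold Spec_delete_block
  -- A's side
  have hA : delete_block m n bd =
      ((PySem.Set.ofList (delList m n bd)).foldl (fun b p =>
        PySem.List.pySetD b p.1 (PySem.List.pySetD (PySem.List.pyGetD b p.1 []) p.2 "")) bd,
       ((PySem.Set.ofList (delList m n bd)).length : Int)) := by
    simp only [delete_block]
    rw [del_eq]
  set S : PySem.Set (Int × Int) := PySem.Set.ofList (delList m n bd) with hS
  have hSmem : ∀ p : Int × Int, p ∈ S ↔ bHit bd m n p.1 p.2 = true := by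
    intro p; rw [hS, PySem.Set.mem_ofList]; exact mem_delList
  have hSnodup : S.Nodup := PySem.Set.nodup_ofList _
  have hbounds : ∀ p ∈ S, 0 ≤ p.1 ∧ p.1.toNat < bd.length ∧ 0 ≤ p.2 ∧
      p.2.toNat < (bd.getD p.1.toNat []).length :=
    fun p hp => hit_inbounds hPre ((hSmem p).1 hp)
  obtain ⟨hAlen, hArowlen, hAelem⟩ := foldA S bd hbounds
  -- B's side
  have hB : delete_block_alt m n bd =
      ((PySem.List.enumerate bd 0).map (fun p =>
         (bSweepRow (PySem.List.pyGetD ((PySem.List.pyRange 0 (bd.length : Int) 1).map (fun x =>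
           (PySem.List.pyRange 0 ((PySem.List.pyGetD bd x []).length : Int) 1).map (fun y =>
             bHit bd m n x y))) p.1 []) p.2).1),
       ((PySem.List.enumerate bd 0).map (fun p =>
         (bSweepRow (PySem.List.pyGetD ((PySem.List.pyRange 0 (bd.length : Int) 1).map (fun x =>
           (PySem.List.pyRange 0 ((PySem.List.pyGetD bd x []).length : Int) 1).map (fun y =>
             bHit bd m n x y))) p.1 []) p.2).2)).sum) := by
    simp only [delete_block_alt]
    rw [outerB]
    simp
  set marked : List (List Bool) := (PySem.List.pyRange 0 (bd.length : Int) 1).map (fun x =>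
    (PySem.List.pyRange 0 ((PySem.List.pyGetD bd x []).length : Int) 1).map (fun y =>
      bHit bd m n x y)) with hmarked
  -- marked lookups
  have hmarked_get : ∀ k : Nat, k < bd.length →
      PySem.List.pyGetD marked ((k : Nat) : Int) [] =
        (PySem.List.pyRange 0 (((bd.getD k []).length : Nat) : Int) 1).map
          (fun y => bHit bd m n ((k : Nat) : Int) y) := by
    intro k hk
    rw [PySem.List.pyGetD_natCast marked k [], hmarked,
      getD_map_pyRange_nat _ _ _ _ hk, PySem.List.pyGetD_natCast bd k []]
  have hhits_get : ∀ k j : Nat, j < (bd.getD k []).length →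
      ((PySem.List.pyRange 0 (((bd.getD k []).length : Nat) : Int) 1).map
        (fun y => bHit bd m n ((k : Nat) : Int) y)).getD j false = bHit bd m n (k : Int) (j : Int) :=
    fun k j hj => getD_map_pyRange_nat _ false _ j hj
  rw [hA, hB]
  refine Prod.ext ?_ ?_
  · -- the boards agree
    dsimp only
    apply List.ext_getElem
    · rw [hAlen, List.length_map, PySem.List.length_enumerate]
    · intro k hk1 hk2
      have hkbd : k < bd.length := by rwa [hAlen] at hk1
      have henumget : (PySem.List.enumerate bd 0)[k]'(by rwa [PySem.List.length_enumerate]) =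
          ((0 : Int) + (k : Int), bd[k]) := PySem.List.getElem_enumerate ..
      rw [List.getElem_map, henumget]
      simp only [zero_add]
      rw [hmarked_get k hkbd]
      -- rows agree pointwise
      have hrowA : (S.foldl (fun b p =>
          PySem.List.pySetD b p.1 (PySem.List.pySetD (PySem.List.pyGetD b p.1 []) p.2 "")) bd)[k]'hk1
          = (S.foldl (fun b p =>
          PySem.List.pySetD b p.1 (PySem.List.pySetD (PySem.List.pyGetD b p.1 []) p.2 "")) bd).getD k [] := by
        rw [List.getD_eq_getElem _ _ hk1]
      rw [hrowA]
      apply List.ext_getElem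
      · rw [hArowlen k, bSweepRow_len]
        rw [List.getD_eq_getElem _ _ hkbd]
      · intro j hj1 hj2
        have hjlen : j < (bd.getD k []).length := by
          rwa [hArowlen k] at hj1
        have hjrow : j < bd[k].length := by
          rwa [List.getD_eq_getElem _ _ hkbd] at hjlen
        rw [← List.getD_eq_getElem _ ("") hj1, ← List.getD_eq_getElem _ ("") hj2]
        rw [bSweepRow_getD _ _ _ hjrow]
        rw [show bd[k] = bd.getD k [] from (List.getD_eq_getElem _ _ hkbd).symm] at hjrow ⊢
        rw [hhits_get k j hjlen]
        rw [hAelem k j]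
        by_cases hh : bHit bd m n (k : Int) (j : Int) = true
        · rw [if_pos hh, if_pos ((hSmem _).2 hh)]
        · rw [if_neg hh, if_neg (fun hmem => hh ((hSmem _).1 hmem))]
  · -- the counts agree
    dsimp only
    -- S.length = number of positions hit
    have hperm : S.Perm ((positions bd).filter (fun p => bHit bd m n p.1 p.2)) := by
      refine (List.perm_ext_iff_of_nodup hSnodup ((nodup_positions bd).filter _)).mpr ?_
      intro p
      rw [hSmem p, List.mem_filter, mem_positions]
      constructor
      · intro h
        exact ⟨hit_inbounds hPre h, h⟩
      · rintro ⟨_, h⟩; exact h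
    have hlenS : S.length = ((positions bd).countP (fun p => bHit bd m n p.1 p.2)) := by
      rw [hperm.length_eq, ← List.countP_eq_length_filter]
    rw [hlenS]
    unfold positions
    rw [countP_flatMap]
    -- rewrite B's sum to the same shape
    have hmapeq : (PySem.List.enumerate bd 0).map (fun p =>
        (bSweepRow (PySem.List.pyGetD marked p.1 []) p.2).2)
        = (List.range bd.length).map (fun k =>
            ((((List.range ((bd.getD k []).length)).map (fun (j : Nat) => ((k : Int), (j : Int)))).countP
              (fun p => bHit bd m n p.1 p.2) : Nat) : Int)) := by
      apply List.ext_getElem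
      · rw [List.length_map, PySem.List.length_enumerate, List.length_map, List.length_range]
      · intro k hk1 hk2
        have hkbd : k < bd.length := by
          rwa [List.length_map, PySem.List.length_enumerate] at hk1
        have henumget : (PySem.List.enumerate bd 0)[k]'(by rwa [PySem.List.length_enumerate]) =
            ((0 : Int) + (k : Int), bd[k]) := PySem.List.getElem_enumerate ..
        rw [List.getElem_map, List.getElem_map, List.getElem_range, henumget]
        simp only [zero_add]
        rw [hmarked_get k hkbd, bSweepRow_cnt]
        rw [List.countP_map]
        congr 1
        have hrl : bd[k].length = (bd.getD k []).length := by
          rw [List.getD_eq_getElem _ _ hkbd]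
        rw [hrl]
        apply List.countP_congr
        intro j hj
        rw [List.mem_range] at hj
        simp only [Function.comp]
        rw [hhits_get k j hj]
    rw [hmapeq]
    rw [Nat.cast_list_sum, List.map_map]
    rfl
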